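-- pv_equiv track=rewrite | github.com/saiashish06/Chatbot | yoyopizza.py | select_pizza
-- ===== SOURCE A (Python) =====
-- check_corn=["corn",'Corn','Cornveg']
--
-- check_Cheese=["cheese","chese","cheeseveg"]
--
-- check_chicken=["chicken","Chicken"]
--
-- check_super=["supreme","nonvegsupreme","nonveg"]
--
-- def select_pizza(sentence):
--     for word in sentence.split():
--         if word.lower() in check_corn:
--             return "Corn Veg"
--     for word in sentence.split():
--         if word.lower() in check_Cheese:
--             return "Cheese Veg"
--     for word in sentence.split():
--         if word.lower() in check_chicken:
--             return "Chicken"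
--     for word in sentence.split():
--         if word.lower() in check_super:
--             return "NonVegSupreme"
-- ===== SOURCE B (Python) =====
-- check_corn=["corn",'Corn','Cornveg']
--
-- check_Cheese=["cheese","chese","cheeseveg"]
--
-- check_chicken=["chicken","Chicken"]
--
-- check_super=["supreme","nonvegsupreme","nonveg"]
--
-- def select_pizza(sentence):
--     # one pass: flag each category, then resolve by priority
--     corn = cheese = chicken = super_ = False
--     for word in sentence.split():
--         w = word.lower()
--         corn = corn or w in check_corn
--         cheese = cheese or w in check_Cheese
--         chicken = chicken or w in check_chicken
--         super_ = super_ or w in check_super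
--     if corn:
--         return "Corn Veg"
--     if cheese:
--         return "Cheese Veg"
--     if chicken:
--         return "Chicken"
--     if super_:
--         return "NonVegSupreme"
--     return None
-- ===== Notes on version B (the rewrite author's own statement) =====
-- stated objective: alternative
-- what changed: Replaced A's four sequential re-splitting scans of the sentence by a single split and one pass that accumulates a boolean flag per category, resolved afterwards in priority order.
import Mathlib
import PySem

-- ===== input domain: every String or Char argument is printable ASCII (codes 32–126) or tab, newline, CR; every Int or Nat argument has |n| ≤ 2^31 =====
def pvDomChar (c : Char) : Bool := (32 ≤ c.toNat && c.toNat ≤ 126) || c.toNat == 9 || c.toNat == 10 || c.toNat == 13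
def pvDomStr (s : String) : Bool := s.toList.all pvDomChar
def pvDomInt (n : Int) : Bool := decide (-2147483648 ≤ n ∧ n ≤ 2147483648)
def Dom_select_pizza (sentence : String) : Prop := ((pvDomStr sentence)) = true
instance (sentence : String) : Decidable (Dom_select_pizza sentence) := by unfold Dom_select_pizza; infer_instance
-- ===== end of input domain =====

-- B replaces A's four sequential re-splitting scans by one split and one pass
-- accumulating a flag per category, resolved in priority order (objective: alternative).


-- ===== PORT A =====
def check_corn : List String := ["corn", "Corn", "Cornveg"]
def check_Cheese : List String := ["cheese", "chese", "cheeseveg"]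
def check_chicken : List String := ["chicken", "Chicken"]
def check_super : List String := ["supreme", "nonvegsupreme", "nonveg"]

-- A's four loops, each over a fresh split of the sentence
def pizzaLoop4 : List String → Option String
  | [] => none
  | w :: ws => if check_super.contains (PySem.Str.lower w) then some "NonVegSupreme" else pizzaLoop4 ws

def pizzaLoop3 (sentence : String) : List String → Option String
  | [] => pizzaLoop4 (PySem.Str.split₀ sentence)
  | w :: ws => if check_chicken.contains (PySem.Str.lower w) then some "Chicken" else pizzaLoop3 sentence ws

def pizzaLoop2 (sentence : String) : List String → Option String
  | [] => pizzaLoop3 sentence (PySem.Str.split₀ sentence)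
  | w :: ws => if check_Cheese.contains (PySem.Str.lower w) then some "Cheese Veg" else pizzaLoop2 sentence ws

def pizzaLoop1 (sentence : String) : List String → Option String
  | [] => pizzaLoop2 sentence (PySem.Str.split₀ sentence)
  | w :: ws => if check_corn.contains (PySem.Str.lower w) then some "Corn Veg" else pizzaLoop1 sentence ws

def select_pizza (sentence : String) : Option String :=
  pizzaLoop1 sentence (PySem.Str.split₀ sentence)

-- ===== PORT B =====
def pizzaStep (f : Bool × Bool × Bool × Bool) (word : String) : Bool × Bool × Bool × Bool :=
  let w := PySem.Str.lower word
  (f.1 || check_corn.contains w,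
   f.2.1 || check_Cheese.contains w,
   f.2.2.1 || check_chicken.contains w,
   f.2.2.2 || check_super.contains w)

def select_pizza_alt (sentence : String) : Option String :=
  let fl := (PySem.Str.split₀ sentence).foldl pizzaStep (false, false, false, false)
  if fl.1 then some "Corn Veg"
  else if fl.2.1 then some "Cheese Veg"
  else if fl.2.2.1 then some "Chicken"
  else if fl.2.2.2 then some "NonVegSupreme"
  else none

-- ===== PRECONDITION & SPEC =====
def Spec_select_pizza (sentence : String) (out : Option String) : Prop := out = select_pizza_alt sentence
instance (sentence : String) (out : Option String) : Decidable (Spec_select_pizza sentence out) := by unfold Spec_select_pizza; infer_instance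

-- ===== CLAIM (what is proved, stated in full; the proofs are below) =====
def Claim_equal_select_pizza : Prop := ∀ (sentence : String), Dom_select_pizza sentence → Spec_select_pizza sentence (select_pizza sentence)

-- ===== LEMMAS AND PROOFS =====

theorem pizzaStep_foldl (ws : List String) (f : Bool × Bool × Bool × Bool) :
    ws.foldl pizzaStep f =
      (f.1 || ws.any (fun w => check_corn.contains (PySem.Str.lower w)),
       f.2.1 || ws.any (fun w => check_Cheese.contains (PySem.Str.lower w)),
       f.2.2.1 || ws.any (fun w => check_chicken.contains (PySem.Str.lower w)),
       f.2.2.2 || ws.any (fun w => check_super.contains (PySem.Str.lower w))) := by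
  induction ws generalizing f with
  | nil => simp
  | cons w ws ih =>
    obtain ⟨a, b, c, d⟩ := f
    simp [List.foldl, ih, pizzaStep, Bool.or_assoc]

theorem pizzaLoop4_eq (ws : List String) :
    pizzaLoop4 ws =
      (if ws.any (fun w => check_super.contains (PySem.Str.lower w)) then some "NonVegSupreme" else none) := by
  induction ws with
  | nil => simp [pizzaLoop4]
  | cons w ws ih => by_cases h : PySem.Str.lower w ∈ check_super <;> simp [pizzaLoop4, h, ih]

theorem pizzaLoop3_eq (s : String) (ws : List String) :
    pizzaLoop3 s ws =
      (if ws.any (fun w => check_chicken.contains (PySem.Str.lower w)) then some "Chicken"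
       else pizzaLoop4 (PySem.Str.split₀ s)) := by
  induction ws with
  | nil => simp [pizzaLoop3]
  | cons w ws ih => by_cases h : PySem.Str.lower w ∈ check_chicken <;> simp [pizzaLoop3, h, ih]

theorem pizzaLoop2_eq (s : String) (ws : List String) :
    pizzaLoop2 s ws =
      (if ws.any (fun w => check_Cheese.contains (PySem.Str.lower w)) then some "Cheese Veg"
       else pizzaLoop3 s (PySem.Str.split₀ s)) := by
  induction ws with
  | nil => simp [pizzaLoop2]
  | cons w ws ih => by_cases h : PySem.Str.lower w ∈ check_Cheese <;> simp [pizzaLoop2, h, ih]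

theorem pizzaLoop1_eq (s : String) (ws : List String) :
    pizzaLoop1 s ws =
      (if ws.any (fun w => check_corn.contains (PySem.Str.lower w)) then some "Corn Veg"
       else pizzaLoop2 s (PySem.Str.split₀ s)) := by
  induction ws with
  | nil => simp [pizzaLoop1]
  | cons w ws ih => by_cases h : PySem.Str.lower w ∈ check_corn <;> simp [pizzaLoop1, h, ih]

-- ===== VERDICT (by name: the statement is the Claim_ definition above) =====
theorem select_pizza_spec : Claim_equal_select_pizza := by
  intro s _
  unfold Spec_select_pizza select_pizza select_pizza_alt
  rw [pizzaLoop1_eq, pizzaLoop2_eq, pizzaLoop3_eq, pizzaLoop4_eq, pizzaStep_foldl]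
  simp only [Bool.false_or]
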